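-- pv_equiv track=rewrite | github.com/Jiezju/DataStructure_Alogrithm | Python/DataStructure/7_graph/9_employee_imp.py | dfs
-- ===== SOURCE A (Python) =====
-- def dfs(employees, em_id):
--
--     for employee in employees:
--         if employee[0] == em_id:
--             if employee[2] != []:
--                 for ele in employee[2]:
--                     return employee[1] + dfs(employees, ele)
--             else:
--                 return employee[1]
-- ===== SOURCE B (Python) =====
-- def dfs(employees, em_id):
--     emp = None
--     for e in employees:
--         if e[0] == em_id:
--             emp = e
--             break
--     if emp is None:
--         return None
--     total = 0
--     while emp[2] != []:
--         total += emp[1]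
--         nxt = emp[2][0]
--         emp = None
--         for e in employees:
--             if e[0] == nxt:
--                 emp = e
--                 break
--         # if nxt is missing, emp is None and emp[2] raises TypeError on the
--         # next iteration, just as A's `employee[1] + None` does
--     return total + emp[1]
-- ===== Notes on version B (the rewrite author's own statement) =====
-- stated objective: alternative
-- what changed: Replaces A's recursion (one recursive call per level of the first-subordinate chain) with an explicit iterative while-loop carrying a running total, using a break-based linear find at each step.
import Mathlib
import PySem

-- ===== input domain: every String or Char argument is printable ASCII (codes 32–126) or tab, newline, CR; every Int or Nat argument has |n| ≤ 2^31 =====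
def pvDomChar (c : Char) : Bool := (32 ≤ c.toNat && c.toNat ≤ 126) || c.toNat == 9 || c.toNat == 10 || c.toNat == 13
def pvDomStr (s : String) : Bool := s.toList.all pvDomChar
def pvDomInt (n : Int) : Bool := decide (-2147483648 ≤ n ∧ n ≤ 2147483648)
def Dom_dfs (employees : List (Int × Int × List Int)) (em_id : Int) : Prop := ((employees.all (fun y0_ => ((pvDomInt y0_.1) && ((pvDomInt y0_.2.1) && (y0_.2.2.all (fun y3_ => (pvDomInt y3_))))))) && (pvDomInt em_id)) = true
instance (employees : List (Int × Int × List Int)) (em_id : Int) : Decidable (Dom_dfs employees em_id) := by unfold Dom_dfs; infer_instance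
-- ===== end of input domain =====

-- B replaces A's recursion over the first-subordinate chain by an explicit
-- while-loop with a running total (alternative decomposition, same cost).

-- ===== PORT A =====
-- A's recursion has no structural decrease (Python diverges on id cycles), so the
-- port carries a fuel bound of employees.length, enough for every chain on which
-- the Python returns; `none` stands for Python raising (TypeError on a missing
-- subordinate id: employee[1] + None) or diverging — both outside Pre_dfs.
def dfsAux (fuel : Nat) (employees scan : List (Int × Int × List Int)) (em_id : Int) : Option Int :=
  match scan with
  | [] => none                                   -- fell off the for loop: Python returns None
  | (i, imp, subs) :: rest =>
    if i == em_id then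
      match subs with
      | [] => some imp                           -- employee[2] == []
      | s :: _ =>                                -- `for ele in employee[2]: return …` returns on the first element
        match fuel with
        | 0 => none
        | f + 1 => (dfsAux f employees employees s).map (fun v => imp + v)
    else dfsAux fuel employees rest em_id

def dfs (employees : List (Int × Int × List Int)) (em_id : Int) : Option Int :=
  dfsAux employees.length employees employees em_id

-- ===== PORT B =====
-- B's break-based linear find of an id
def findEmp (scan : List (Int × Int × List Int)) (em_id : Int) : Option (Int × Int × List Int) :=
  match scan with
  | [] => none
  | e :: rest => if e.1 == em_id then some e else findEmp rest em_id

-- B's while-loop: total accumulates importances down the first-subordinate chain.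
-- Same fuel bound as port A; `none` = the TypeError B raises on a missing id.
def loopB (fuel : Nat) (employees : List (Int × Int × List Int)) (emp : Int × Int × List Int) (total : Int) : Option Int :=
  match emp.2.2 with
  | [] => some (total + emp.2.1)
  | s :: _ =>
    match fuel with
    | 0 => none
    | f + 1 =>
      match findEmp employees s with
      | none => none                             -- emp is None: emp[2] raises TypeError
      | some e => loopB f employees e (total + emp.2.1)

def dfs_alt (employees : List (Int × Int × List Int)) (em_id : Int) : Option Int :=
  match findEmp employees em_id with
  | none => none
  | some e => loopB employees.length employees e 0

-- ===== PRECONDITION & SPEC =====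
-- chainOk: a SHAPE condition on the input graph, not a run of either algorithm:
-- it follows only the input's first-subordinate id links (never importances, no
-- accumulation) and asks that the chain from id resolves every id and reaches an
-- employee with no subordinates within `fuel` link steps.
def chainOk (fuel : Nat) (employees : List (Int × Int × List Int)) (id : Int) : Bool :=
  match findEmp employees id with
  | none => false
  | some (_, _, subs) =>
    match subs with
    | [] => true
    | s :: _ =>
      match fuel with
      | Nat.zero => false
      | Nat.succ f => chainOk f employees s

-- Pre_dfs excludes exactly the inputs on which the Python A raises or diverges:
-- a first-subordinate chain that hits a missing id (Python adds None into an
-- int, a TypeError) or cycles (infinite recursion). Wherever A returns, its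
-- chain has distinct ids, so it is shorter than employees.length and Pre_dfs
-- holds; em_id absent from the list (A falls off its loop, returns None) is in.
def Pre_dfs (employees : List (Int × Int × List Int)) (em_id : Int) : Prop :=
  findEmp employees em_id = none ∨ chainOk employees.length employees em_id = true
instance (employees : List (Int × Int × List Int)) (em_id : Int) : Decidable (Pre_dfs employees em_id) := by unfold Pre_dfs; infer_instance

def pvWitness_dfs : (List (Int × Int × List Int)) × Int := ([(1, 5, [2]), (2, 3, [])], 1)

def Spec_dfs (employees : List (Int × Int × List Int)) (em_id : Int) (out : Option Int) : Prop := out = dfs_alt employees em_id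
instance (employees : List (Int × Int × List Int)) (em_id : Int) (out : Option Int) : Decidable (Spec_dfs employees em_id out) := by unfold Spec_dfs; infer_instance

-- ===== CLAIM (what is proved, stated in full; the proofs are below) =====
def Claim_equal_dfs : Prop := ∀ (employees : List (Int × Int × List Int)) (em_id : Int), Dom_dfs employees em_id → Pre_dfs employees em_id → Spec_dfs employees em_id (dfs employees em_id)

-- ===== LEMMAS AND PROOFS =====

-- A's scan over the employee list is the break-based find followed by the branch.
theorem dfsAux_eq_find (fuel : Nat) (employees scan : List (Int × Int × List Int)) (em_id : Int) :
    dfsAux fuel employees scan em_id =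
      match findEmp scan em_id with
      | none => none
      | some e =>
        match e.2.2 with
        | [] => some e.2.1
        | s :: _ =>
          match fuel with
          | 0 => none
          | f + 1 => (dfsAux f employees employees s).map (fun v => e.2.1 + v) := by
  induction scan with
  | nil => simp [dfsAux, findEmp]
  | cons e rest ih =>
    obtain ⟨i, imp, subs⟩ := e
    by_cases h : i == em_id
    · cases subs with
      | nil => simp [dfsAux, findEmp, h]
      | cons s t => cases fuel <;> simp [dfsAux, findEmp, h]
    · rw [dfsAux.eq_def]
      simp [findEmp, h, ih]

-- The loop with accumulator computes A's recursive value shifted by the total.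
theorem loopB_eq (fuel : Nat) (employees : List (Int × Int × List Int)) :
    ∀ (id : Int) (e : Int × Int × List Int) (total : Int),
      findEmp employees id = some e → chainOk fuel employees id = true →
      loopB fuel employees e total = (dfsAux fuel employees employees id).map (fun v => total + v) := by
  induction fuel with
  | zero =>
    intro id e total hf hc
    obtain ⟨ei, eimp, esubs⟩ := e
    rw [dfsAux_eq_find]
    cases esubs with
    | nil => simp [loopB, hf]
    | cons s t => rw [chainOk.eq_def] at hc; rw [hf] at hc; simp at hc
  | succ f ih =>
    intro id e total hf hc
    obtain ⟨ei, eimp, esubs⟩ := e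
    rw [dfsAux_eq_find]
    cases esubs with
    | nil => simp [loopB, hf]
    | cons s t =>
      rw [chainOk.eq_def] at hc; rw [hf] at hc
      simp only [] at hc
      have hfind : ∃ e', findEmp employees s = some e' := by
        cases h : findEmp employees s with
        | none => rw [chainOk.eq_def] at hc; rw [h] at hc; simp at hc
        | some e' => exact ⟨e', rfl⟩
      obtain ⟨e', hfind⟩ := hfind
      rw [loopB.eq_def]
      simp only [hfind, hf]
      rw [ih s e' (total + eimp) hfind hc]
      cases dfsAux f employees employees s <;> simp
      ring

-- ===== VERDICT (by name: the statement is the Claim_ definition above) =====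
theorem dfs_spec : Claim_equal_dfs := by
  intro employees em_id _ hpre
  unfold Spec_dfs dfs dfs_alt
  rcases hpre with h | h
  · rw [dfsAux_eq_find, h]
  · have hfind : ∃ e, findEmp employees em_id = some e := by
      cases hf : findEmp employees em_id with
      | none => rw [chainOk.eq_def] at h; rw [hf] at h; simp at h
      | some e => exact ⟨e, rfl⟩
    obtain ⟨e, hf⟩ := hfind
    simp only [hf]
    rw [loopB_eq employees.length employees em_id e 0 hf h]
    cases dfsAux employees.length employees employees em_id <;> simp
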